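-- pv_equiv track=rewrite | github.com/mifengac/yfjcgkzx | jingqing_fenxi/service/jingqing_fenxi_service.py | calc_time_period
-- ===== SOURCE A (Python) =====
-- def _normalize_time_bucket_hours(bucket_hours):
--     valid = [1, 2, 3, 4, 6, 8, 12]
--     try:
--         v = int(bucket_hours)
--     except Exception:
--         v = 3
--     if v not in valid:
--         v = 3
--     return v
--
-- def calc_time_hourly_counts(data):
--     """Return 24-length hourly count array for local front-end re-bucketing."""
--     hourly = [0] * 24
--     for row in data:
--         call_time = row.get("callTime")
--         if not call_time or len(call_time) < 13:
--             continue
--         try: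
--             hour = int(call_time[11:13])
--         except Exception:
--             continue
--         if 0 <= hour <= 23:
--             hourly[hour] += 1
--     return hourly
--
-- def calc_time_period(data, bucket_hours=3):
--     """Calculate case counts by dynamic time buckets."""
--     bucket_hours = _normalize_time_bucket_hours(bucket_hours)
--
--     hourly = calc_time_hourly_counts(data)
--     periods = []
--     for start in range(0, 24, bucket_hours):
--         end = start + bucket_hours
--         count = sum(hourly[start:end])
--         periods.append((f"{start}-{end}时", count))
--     return sorted(periods, key=lambda x: x[1], reverse=True)
-- ===== SOURCE B (Python) =====
-- def calc_time_period(data, bucket_hours=3):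
--     """One pass: bucket each valid row directly into a per-bucket counter dict."""
--     b = bucket_hours
--     try:
--         b = int(b)
--     except Exception:
--         b = 3
--     if b not in (1, 2, 3, 4, 6, 8, 12):
--         b = 3
--     counts = {s: 0 for s in range(0, 24, b)}
--     for row in data:
--         t = row.get("callTime")
--         if not t or len(t) < 13:
--             continue
--         try:
--             h = int(t[11:13])
--         except Exception:
--             continue
--         if 0 <= h <= 23:
--             counts[(h // b) * b] += 1
--     periods = [(f"{s}-{s + b}时", c) for s, c in counts.items()]
--     return sorted(periods, key=lambda x: x[1], reverse=True)
-- ===== Notes on version B (the rewrite author's own statement) =====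
-- stated objective: alternative
-- what changed: Replaces the 24-slot hourly array plus per-bucket slice-and-sum with a single pass that computes each row's bucket start by integer division and increments a pre-initialized per-bucket counter dict, then maps the dict items to labelled pairs before the same stable reverse sort.
import Mathlib
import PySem

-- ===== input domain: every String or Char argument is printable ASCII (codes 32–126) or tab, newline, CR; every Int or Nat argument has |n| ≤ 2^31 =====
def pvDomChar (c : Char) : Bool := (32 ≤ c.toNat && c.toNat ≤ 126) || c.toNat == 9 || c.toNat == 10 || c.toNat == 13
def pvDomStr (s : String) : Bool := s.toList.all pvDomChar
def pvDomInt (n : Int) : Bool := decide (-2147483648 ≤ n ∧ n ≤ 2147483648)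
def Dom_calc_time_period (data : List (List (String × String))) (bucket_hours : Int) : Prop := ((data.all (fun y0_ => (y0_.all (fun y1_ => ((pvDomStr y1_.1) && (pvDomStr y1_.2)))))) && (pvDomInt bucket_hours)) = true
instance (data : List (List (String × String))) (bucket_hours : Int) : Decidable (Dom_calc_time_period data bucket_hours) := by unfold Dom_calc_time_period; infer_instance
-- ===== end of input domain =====

-- B replaces A's 24-slot hourly array + per-bucket slice-sums by a single pass that counts
-- directly into a pre-initialized per-bucket dict (alternative decomposition, same cost).

-- ===== PORT A =====
-- the callTime validation both Pythons perform verbatim on each row: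
-- row.get("callTime"); skip if falsy or len < 13; hour = int(call_time[11:13]) (skip on ValueError); keep iff 0 <= hour <= 23
def pvCallHour? (row : List (String × String)) : Option Int :=
  match (PySem.Dict.mk row).get? "callTime" with
  | none => none
  | some ct =>
    if ct = "" then none
    else if PySem.Str.len ct < 13 then none
    else
      match PySem.Int.ofStr? (PySem.Str.slice ct (some 11) (some 13)) with
      | none => none
      | some h => if 0 ≤ h ∧ h ≤ 23 then some h else none

def calc_time_period (data : List (List (String × String))) (bucket_hours : Int) : List (String × Int) :=
  -- _normalize_time_bucket_hours: int() of an int is itself; replace by 3 unless in the valid list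
  let b := if bucket_hours ∈ [1, 2, 3, 4, 6, 8, 12] then bucket_hours else 3
  -- calc_time_hourly_counts: hourly[hour] += 1 per valid row
  let hourly : List Int := data.foldl (fun hl row =>
    match pvCallHour? row with
    | some hour => hl.modify hour.toNat (· + 1)
    | none => hl) (List.replicate 24 0)
  -- periods loop: for start in range(0, 24, b): append (label, sum(hourly[start:start+b]))
  let periods := (PySem.List.pyRange 0 24 b).foldl (fun acc start =>
    acc ++ [(PySem.Int.toStr start ++ "-" ++ PySem.Int.toStr (start + b) ++ "时",
             (PySem.List.slice hourly (some start) (some (start + b))).sum)]) []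
  PySem.List.sorted periods (fun x => x.2) true

-- ===== PORT B =====
def calc_time_period_alt (data : List (List (String × String))) (bucket_hours : Int) : List (String × Int) :=
  let b := if bucket_hours ∈ [1, 2, 3, 4, 6, 8, 12] then bucket_hours else 3
  -- counts = {s: 0 for s in range(0, 24, b)}
  let counts0 : PySem.Dict Int Int :=
    (PySem.List.pyRange 0 24 b).foldl (fun d s => d.insert s 0) PySem.Dict.empty
  -- one pass: counts[(h // b) * b] += 1  (the key provably exists; modify with default 0 is that increment)
  let counts := data.foldl (fun d row =>
    match pvCallHour? row with
    | some h => d.modify (PySem.Int.floordiv h b * b) 0 (· + 1)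
    | none => d) counts0
  -- periods = [(f"{s}-{s+b}时", c) for s, c in counts.items()]
  let periods := counts.items.map (fun p =>
    (PySem.Int.toStr p.1 ++ "-" ++ PySem.Int.toStr (p.1 + b) ++ "时", p.2))
  PySem.List.sorted periods (fun x => x.2) true

-- ===== PRECONDITION & SPEC =====
def Spec_calc_time_period (data : List (List (String × String))) (bucket_hours : Int) (out : List (String × Int)) : Prop := out = calc_time_period_alt data bucket_hours
instance (data : List (List (String × String))) (bucket_hours : Int) (out : List (String × Int)) : Decidable (Spec_calc_time_period data bucket_hours out) := by unfold Spec_calc_time_period; infer_instance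

-- ===== CLAIM (what is proved, stated in full; the proofs are below) =====
def Claim_equal_calc_time_period : Prop := ∀ (data : List (List (String × String))) (bucket_hours : Int), Dom_calc_time_period data bucket_hours → Spec_calc_time_period data bucket_hours (calc_time_period data bucket_hours)

-- ===== LEMMAS AND PROOFS =====

-- the row loops skip rows whose extraction is none: they are folds over the filterMap
theorem pv_foldA_match (data : List (List (String × String))) :
    ∀ init : List Int,
      data.foldl (fun hl row => match pvCallHour? row with
        | some hour => hl.modify hour.toNat (· + 1)
        | none => hl) init
      = (data.filterMap pvCallHour?).foldl (fun hl hour => hl.modify hour.toNat (· + 1)) init := by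
  induction data with
  | nil => intro init; rfl
  | cons a l ih =>
    intro init
    simp only [List.foldl_cons, List.filterMap_cons]
    cases hr : pvCallHour? a <;> simp [ih]

theorem pv_foldB_match (b : Int) (data : List (List (String × String))) :
    ∀ init : PySem.Dict Int Int,
      data.foldl (fun d row => match pvCallHour? row with
        | some h => d.modify (PySem.Int.floordiv h b * b) 0 (· + 1)
        | none => d) init
      = (data.filterMap pvCallHour?).foldl
          (fun d h => d.modify (PySem.Int.floordiv h b * b) 0 (· + 1)) init := by
  induction data with
  | nil => intro init; rfl
  | cons a l ih =>
    intro init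
    simp only [List.foldl_cons, List.filterMap_cons]
    cases hr : pvCallHour? a <;> simp [ih]

theorem pvCallHour?_bounds (row : List (String × String)) (h : Int)
    (hh : pvCallHour? row = some h) : 0 ≤ h ∧ h ≤ 23 := by
  unfold pvCallHour? at hh
  repeat' split at hh
  all_goals simp_all

-- pvS l s n = sum of l.getD at indices s, s+1, …, s+n-1
def pvS (l : List Int) (s n : Nat) : Int := ∑ k ∈ Finset.range n, l.getD (s + k) 0

theorem pv_sum_take (l : List Int) (n : Nat) :
    (l.take n).sum = ∑ k ∈ Finset.range n, l.getD k 0 := by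
  induction n with
  | zero => simp
  | succ n ih =>
    rw [List.take_add_one, Finset.sum_range_succ, List.sum_append, ih]
    rcases h : l[n]? with _ | v <;> simp [List.getD_eq_getElem?_getD, h]

theorem pv_sum_drop_take (l : List Int) (s n : Nat) :
    ((l.drop s).take n).sum = pvS l s n := by
  rw [pv_sum_take, pvS]
  refine Finset.sum_congr rfl (fun k _ => ?_)
  simp [List.getD_eq_getElem?_getD, List.getElem?_drop]

theorem pv_getD_modify (l : List Int) (j k : Nat) (hj : j < l.length) :
    (l.modify j (· + 1)).getD k 0 = l.getD k 0 + (if k = j then 1 else 0) := by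
  by_cases hk : k = j
  · subst hk
    simp [List.getD_eq_getElem?_getD, List.getElem?_eq_getElem hj]
  · have hjk : j ≠ k := fun h => hk h.symm
    simp only [List.getD_eq_getElem?_getD, List.getElem?_modify, if_neg hk]
    cases l[k]? <;> simp [hjk]

theorem pv_pvS_modify (l : List Int) (j s n : Nat) (hj : j < l.length) :
    pvS (l.modify j (· + 1)) s n = pvS l s n + (if s ≤ j ∧ j < s + n then 1 else 0) := by
  unfold pvS
  have h1 : ∀ k ∈ Finset.range n,
      (l.modify j (· + 1)).getD (s + k) 0 = l.getD (s + k) 0 + (if s + k = j then 1 else 0) :=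
    fun k _ => pv_getD_modify l j (s + k) hj
  rw [Finset.sum_congr rfl h1, Finset.sum_add_distrib]
  congr 1
  by_cases hs : s ≤ j ∧ j < s + n
  · have h2 : ∀ k ∈ Finset.range n, (if s + k = j then (1:Int) else 0) = (if k = j - s then 1 else 0) := by
      intro k _; split_ifs <;> omega
    rw [Finset.sum_congr rfl h2, Finset.sum_ite_eq' (Finset.range n) (j - s) (fun _ => (1:Int))]
    simp only [Finset.mem_range]
    rw [if_pos (by omega), if_pos hs]
  · have h2 : ∀ k ∈ Finset.range n, (if s + k = j then (1:Int) else 0) = 0 := by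
      intro k hk; simp only [Finset.mem_range] at hk; rw [if_neg (by omega)]
    rw [Finset.sum_congr rfl h2]
    simp [hs]

-- A-side fold characterisation: the bucket-window sum grows by 1 per hour falling in the window
theorem pv_A_fold (H : List Int) (s n : Nat) :
    ∀ (l : List Int), l.length = 24 → (∀ h ∈ H, 0 ≤ h ∧ h ≤ 23) →
      pvS (H.foldl (fun hl h => hl.modify h.toNat (· + 1)) l) s n
        = pvS l s n + (H.countP (fun h => decide (s ≤ h.toNat ∧ h.toNat < s + n)) : Int) := by
  induction H with
  | nil => intro l _ _; simp
  | cons h H ih =>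
    intro l hlen hb
    have hb0 := hb h (by simp)
    simp only [List.foldl_cons, List.countP_cons]
    rw [ih (l.modify h.toNat (· + 1)) (by simp [hlen]) (fun x hx => hb x (by simp [hx]))]
    rw [pv_pvS_modify l h.toNat s n (by omega)]
    by_cases hc : s ≤ h.toNat ∧ h.toNat < s + n
    · simp only [hc, and_self, decide_true]
      push_cast; ring
    · have hd : decide (s ≤ h.toNat ∧ h.toNat < s + n) = false := by simpa using hc
      simp [if_neg hc, hd]

theorem pv_replicate_pvS (s n : Nat) : pvS (List.replicate 24 (0:Int)) s n = 0 := by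
  unfold pvS
  refine Finset.sum_eq_zero (fun k _ => ?_)
  simp only [List.getD_eq_getElem?_getD, List.getElem?_replicate]
  split <;> rfl

-- counts0 lookups
theorem pv_getD_foldinsert0_not (L : List Int) (s : Int) :
    ∀ (d : PySem.Dict Int Int), s ∉ L →
      (L.foldl (fun d s => d.insert s 0) d).getD s 0 = d.getD s 0 := by
  induction L with
  | nil => intro d _; rfl
  | cons x L ih =>
    intro d hs
    simp only [List.foldl_cons]
    rw [ih _ (by simp at hs; exact hs.2)]
    rw [PySem.Dict.getD_insert_of_ne]
    simp at hs; exact hs.1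

theorem pv_getD_foldinsert0_mem (L : List Int) (s : Int) :
    ∀ (d : PySem.Dict Int Int), s ∈ L →
      (L.foldl (fun d s => d.insert s 0) d).getD s 0 = 0 := by
  induction L with
  | nil => intro d hs; simp at hs
  | cons x L ih =>
    intro d hs
    simp only [List.foldl_cons]
    by_cases hmem : s ∈ L
    · exact ih _ hmem
    · have hx : s = x := by
        rcases List.mem_cons.mp hs with h | h
        · exact h
        · exact absurd h hmem
      subst hx
      rw [pv_getD_foldinsert0_not L s _ hmem]
      rw [PySem.Dict.getD_insert_self]

-- facts about the normalized bucket width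
theorem pv_b_facts (b : Int) (hb : b ∈ [(1:Int), 2, 3, 4, 6, 8, 12]) : 0 < b ∧ b ∣ 24 := by
  fin_cases hb <;> norm_num

theorem pv_nodup_pyRange (b : Int) (hb : b ∈ [(1:Int), 2, 3, 4, 6, 8, 12]) :
    (PySem.List.pyRange 0 24 b).Nodup := by
  fin_cases hb <;> decide

-- the bucket key equals s iff the hour lies in the window [s, s+b)
theorem pv_key_eq_iff (b : Int) (hb0 : 0 < b) (s h : Int) (hs : b ∣ s) :
    PySem.Int.floordiv h b * b = s ↔ s ≤ h ∧ h < s + b := by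
  obtain ⟨q, hq⟩ := hs
  constructor
  · intro he
    have h1 := (PySem.Int.floordiv_eq_iff_of_pos (q := PySem.Int.floordiv h b) hb0).mp rfl
    have h2 : (PySem.Int.floordiv h b + 1) * b = PySem.Int.floordiv h b * b + b := by ring
    constructor <;> linarith [h1.1, h1.2]
  · rintro ⟨h1, h2⟩
    have hq' : PySem.Int.floordiv h b = q := by
      rw [PySem.Int.floordiv_eq_iff_of_pos hb0]
      have e1 : q * b = s := by rw [hq]; ring
      have e2 : (q + 1) * b = s + b := by rw [hq]; ring
      constructor <;> linarith
    rw [hq', hq]; ring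

-- the bucket key of a valid hour is a member of range(0, 24, b)
theorem pv_key_mem (b : Int) (hb0 : 0 < b) (h : Int) (hh : 0 ≤ h ∧ h ≤ 23) :
    PySem.Int.floordiv h b * b ∈ PySem.List.pyRange 0 24 b := by
  rw [PySem.List.mem_pyRange_iff_of_pos hb0]
  have h1 := (PySem.Int.floordiv_eq_iff_of_pos (q := PySem.Int.floordiv h b) hb0).mp rfl
  have hq0 : 0 ≤ PySem.Int.floordiv h b := by
    rw [PySem.Int.floordiv_eq_ediv_of_pos hb0]
    exact Int.ediv_nonneg hh.1 (le_of_lt hb0)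
  refine ⟨mul_nonneg hq0 (le_of_lt hb0), by linarith [h1.1, hh.2], ?_⟩
  exact ⟨PySem.Int.floordiv h b, by rw [sub_zero]; ring⟩

-- main per-bucket lemma and the assembly live in the proof of the verdict below
theorem pv_map_count (l : List Int) (f : Int → Int) (s : Int) :
    (l.map f).count s = l.countP (fun h => f h == s) := by
  simp [List.count, List.countP_map, Function.comp_def]

-- s + b ≤ 24 for every s in range(0, 24, b)
theorem pv_window_fits (b : Int) (hb24 : b ∣ 24) (s : Int)
    (h0 : 0 ≤ s) (h1 : s < 24) (h2 : b ∣ s) : s + b ≤ 24 := by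
  have hd : b ∣ (24 - s) := by
    obtain ⟨c, hc⟩ := h2
    obtain ⟨e, he⟩ := hb24
    exact ⟨e - c, by rw [hc, he]; ring⟩
  have := Int.le_of_dvd (by omega) hd
  omega

-- ===== VERDICT (by name: the statement is the Claim_ definition above) =====
theorem calc_time_period_spec : Claim_equal_calc_time_period := by
  unfold Claim_equal_calc_time_period Spec_calc_time_period
  intro data bucket_hours _
  simp only [calc_time_period, calc_time_period_alt]
  generalize hgen : (if bucket_hours ∈ [(1:Int), 2, 3, 4, 6, 8, 12] then bucket_hours else 3) = b
  have hb : b ∈ [(1:Int), 2, 3, 4, 6, 8, 12] := by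
    subst hgen; split
    · assumption
    · simp
  obtain ⟨hb0, hb24⟩ := pv_b_facts b hb
  -- both folds over data become folds over the extracted valid hours
  rw [pv_foldA_match data, pv_foldB_match b data]
  set Hs := data.filterMap pvCallHour? with hHs
  have hHb : ∀ h ∈ Hs, 0 ≤ h ∧ h ≤ 23 := by
    intro h hh
    rw [hHs, List.mem_filterMap] at hh
    obtain ⟨row, _, hr⟩ := hh
    exact pvCallHour?_bounds row h hr
  set L := PySem.List.pyRange 0 24 b with hL
  have hLnd : L.Nodup := pv_nodup_pyRange b hb
  set counts0 : PySem.Dict Int Int := L.foldl (fun d s => d.insert s 0) PySem.Dict.empty with hc0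
  set counts := Hs.foldl (fun d h => d.modify (PySem.Int.floordiv h b * b) 0 (· + 1)) counts0 with hcounts
  -- keys of counts0 and counts are exactly L
  have hk0 : counts0.keys = L := by
    rw [hc0, PySem.Dict.keys_foldl_insert]
    show PySem.Set.update [] L = L
    rw [PySem.Set.update_nil_left, PySem.Set.ofList_eq_self_of_nodup L hLnd]
  have hkeys : counts.keys = L := by
    rw [hcounts]
    rw [show (fun (d : PySem.Dict Int Int) (h : Int) => d.modify (PySem.Int.floordiv h b * b) 0 (· + 1))
          = (fun (d : PySem.Dict Int Int) (h : Int) => d.modify ((fun h => PySem.Int.floordiv h b * b) h) 0 (· + 1)) from rfl]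
    rw [PySem.Dict.keys_foldl_modify_key, hk0]
    rw [PySem.Set.update_eq_append_filter]
    have hfil : ((PySem.Set.ofList (Hs.map fun h => PySem.Int.floordiv h b * b)).filter
        (fun y => !(PySem.Set.contains L y))) = [] := by
      rw [List.filter_eq_nil_iff]
      intro x hx
      rw [PySem.Set.mem_ofList, List.mem_map] at hx
      obtain ⟨h, hmem, hkey⟩ := hx
      have hmemL := pv_key_mem b hb0 h (hHb h hmem)
      rw [hkey, ← hL] at hmemL
      simp [hmemL]
    rw [hfil, List.append_nil]
  have hknd : counts.keys.Nodup := by rw [hkeys]; exact hLnd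
  -- items of counts are L paired with final counts
  have hitems : counts.items = L.map (fun s => (s, counts.getD s 0)) := by
    rw [PySem.Dict.items_eq_map_keys counts hknd 0, hkeys]
  -- the two per-bucket values agree
  have hval : ∀ s ∈ L, (PySem.List.slice
        (Hs.foldl (fun hl h => hl.modify h.toNat (· + 1)) (List.replicate 24 0))
        (some s) (some (s + b))).sum = counts.getD s 0 := by
    intro s hsL
    have hsfacts := (PySem.List.mem_pyRange_iff_of_pos hb0 s).mp (hL ▸ hsL)
    obtain ⟨hs0, hs24, hsdvd⟩ := hsfacts
    rw [sub_zero] at hsdvd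
    have hfit : s + b ≤ 24 := pv_window_fits b hb24 s hs0 hs24 hsdvd
    -- A side
    rw [PySem.List.slice_toNat _ hs0 (by omega)]
    rw [pv_sum_drop_take]
    have hn : (s + b).toNat - s.toNat = b.toNat := by omega
    rw [hn]
    rw [pv_A_fold Hs s.toNat b.toNat (List.replicate 24 0) (by simp) hHb]
    rw [pv_replicate_pvS]
    -- B side
    rw [hcounts]
    rw [show (fun (d : PySem.Dict Int Int) (h : Int) => d.modify (PySem.Int.floordiv h b * b) 0 (· + 1))
          = (fun (d : PySem.Dict Int Int) (h : Int) => d.modify ((fun h => PySem.Int.floordiv h b * b) h) 0 (· + 1)) from rfl]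
    rw [← List.foldl_map (f := fun h => PySem.Int.floordiv h b * b)
          (g := fun (d : PySem.Dict Int Int) (x : Int) => d.modify x 0 (· + 1))]
    rw [PySem.Dict.getD_foldl_modify_add_one]
    rw [pv_getD_foldinsert0_mem L s _ (hL ▸ hsL)]
    rw [pv_map_count]
    have hcong : Hs.countP (fun h => PySem.Int.floordiv h b * b == s)
        = Hs.countP (fun h => decide (s.toNat ≤ h.toNat ∧ h.toNat < s.toNat + b.toNat)) := by
      apply List.countP_congr
      intro h hmem
      have hhb := hHb h hmem
      have hiff : (PySem.Int.floordiv h b * b = s) ↔ (s.toNat ≤ h.toNat ∧ h.toNat < s.toNat + b.toNat) := by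
        rw [pv_key_eq_iff b hb0 s h hsdvd]
        omega
      simp only [beq_iff_eq, decide_eq_true_eq]
      exact hiff
    rw [hcong]
  -- assemble: both periods lists are the same map over L
  congr 1
  rw [PySem.List.foldl_append_singleton_eq_map]
  rw [hitems, List.map_map]
  refine List.map_congr_left (fun s hsL => ?_)
  simp only [Function.comp]
  rw [hval s hsL]
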